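-- pv_equiv track=rewrite | github.com/mauriciomenon/SCRAP_SAM | scripts/rework_update_flake8_config.py | ensure_lines
-- ===== SOURCE A (Python) =====
-- def ensure_lines(text: str) -> tuple[str, bool]:
--     changed = False
--     lines = text.splitlines()
--     if not lines:
--         lines = ["[flake8]"]
--         changed = True
--
--     if not any(l.strip().lower().startswith("[flake8]") for l in lines):
--         lines.insert(0, "[flake8]")
--         changed = True
--
--     # Normalize key map for easy updates
--     def find_key(key: str) -> int | None:
--         key_lower = key.lower()
--         for i, l in enumerate(lines):
--             s = l.strip()
--             if not s or s.startswith("#"):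
--                 continue
--             if s.lower().startswith(key_lower + " ") or s.lower().startswith(key_lower + "="):
--                 return i
--         return None
--
--     # extend-ignore
--     desired_ignores = {"E203", "W503", "E501", "E722", "E402"}
--     idx = find_key("extend-ignore")
--     if idx is None:
--         lines.append(f"extend-ignore = {', '.join(sorted(desired_ignores))}")
--         changed = True
--     else:
--         # merge
--         current = lines[idx].split("=", 1)[1].strip()
--         items = {p.strip() for p in current.split(',') if p.strip()}
--         new_items = sorted(items | desired_ignores)
--         new_line = f"extend-ignore = {', '.join(new_items)}"
--         if lines[idx] != new_line:
--             lines[idx] = new_line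
--             changed = True
--
--     # max-line-length
--     idx = find_key("max-line-length")
--     if idx is None:
--         lines.append("max-line-length = 88")
--         changed = True
--     else:
--         if lines[idx].split("=", 1)[1].strip() != "88":
--             lines[idx] = "max-line-length = 88"
--             changed = True
--
--     # exclude
--     desired_exclude = [".venv", ".git", "build", "dist", "__pycache__", "bkp"]
--     idx = find_key("exclude")
--     if idx is None:
--         lines.append("exclude = " + ", ".join(desired_exclude))
--         changed = True
--     else:
--         current = [p.strip() for p in lines[idx].split("=", 1)[1].split(',') if p.strip()]
--         merged = []
--         for item in current + desired_exclude:
--             if item not in merged: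
--                 merged.append(item)
--         new_line = "exclude = " + ", ".join(merged)
--         if lines[idx] != new_line:
--             lines[idx] = new_line
--             changed = True
--
--     return "\n".join(lines) + "\n", changed
-- ===== SOURCE B (Python) =====
-- def _fix_ignore(line):
--     desired = {"E203", "W503", "E501", "E722", "E402"}
--     if line is None:
--         return "extend-ignore = " + ", ".join(sorted(desired))
--     items = {p.strip() for p in line.split("=", 1)[1].strip().split(',') if p.strip()}
--     return "extend-ignore = " + ", ".join(sorted(items | desired))
--
--
-- def _fix_length(line):
--     if line is None or line.split("=", 1)[1].strip() != "88":
--         return "max-line-length = 88"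
--     return line
--
--
-- def _fix_exclude(line):
--     merged = []
--     current = [] if line is None else [p.strip() for p in line.split("=", 1)[1].split(',') if p.strip()]
--     for item in current + [".venv", ".git", "build", "dist", "__pycache__", "bkp"]:
--         if item not in merged:
--             merged.append(item)
--     return "exclude = " + ", ".join(merged)
--
--
-- _KEYS = ("extend-ignore", "max-line-length", "exclude")
--
--
-- def ensure_lines(text: str) -> tuple[str, bool]:
--     lines = text.splitlines()
--     changed = not lines
--     if not lines:
--         lines = ["[flake8]"]
--     if not any(l.strip().lower().startswith("[flake8]") for l in lines):
--         lines.insert(0, "[flake8]")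
--         changed = True
--
--     # one pass: first matching line index per config key
--     index = {}
--     for i, l in enumerate(lines):
--         s = l.strip()
--         if not s or s.startswith("#"):
--             continue
--         s = s.lower()
--         for key in _KEYS:
--             if key not in index and (s.startswith(key + " ") or s.startswith(key + "=")):
--                 index[key] = i
--
--     for key, fix in zip(_KEYS, (_fix_ignore, _fix_length, _fix_exclude)):
--         i = index.get(key)
--         if i is None:
--             lines.append(fix(None))
--             changed = True
--         else:
--             new = fix(lines[i])
--             if lines[i] != new:
--                 lines[i] = new
--                 changed = True
--
--     return "\n".join(lines) + "\n", changed
-- ===== Notes on version B (the rewrite author's own statement) =====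
-- stated objective: alternative
-- what changed: A rescans the whole (already partially edited) line list once per config key via find_key; B makes a single indexing pass that records each key's first matching line index in a dict built once, then applies a table-driven fix step (merge/normalize in place or append) per key by dict lookup.
import Mathlib
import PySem

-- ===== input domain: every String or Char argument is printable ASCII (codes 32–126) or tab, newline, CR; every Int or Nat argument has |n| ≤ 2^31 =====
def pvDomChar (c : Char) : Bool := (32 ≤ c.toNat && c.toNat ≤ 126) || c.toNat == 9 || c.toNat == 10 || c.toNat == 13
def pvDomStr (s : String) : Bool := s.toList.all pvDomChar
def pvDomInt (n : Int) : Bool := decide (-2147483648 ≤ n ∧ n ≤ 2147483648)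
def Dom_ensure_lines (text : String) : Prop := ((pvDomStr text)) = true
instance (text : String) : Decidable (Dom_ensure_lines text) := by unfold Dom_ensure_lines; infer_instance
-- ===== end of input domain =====

-- B replaces A's four repeated whole-list scans (one per config key, on the list as edited so far) by ONE
-- indexing pass that records each key's first matching line, plus a table-driven edit loop; return values agree.

-- helpers shared by both ports (the same literals / the same 'split("=",1)[1]' both Pythons contain)
def pvValPart (l : String) : String :=
  (PySem.List.pyGet? ((PySem.Str.splitMax? l "=" 1).getD []) 1).getD ""

def pvDesiredIgnores : PySem.Set String :=
  PySem.Set.ofList ["E203", "W503", "E501", "E722", "E402"]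

def pvDesiredExclude : List String := [".venv", ".git", "build", "dist", "__pycache__", "bkp"]

-- ===== PORT A =====
def pvFindKeyAux (keyLower : String) (i : Int) : List String → Option Int
  | [] => none
  | l :: ls =>
    let s := PySem.Str.strip l
    if s == "" || PySem.Str.startswith s "#" then pvFindKeyAux keyLower (i + 1) ls
    else if PySem.Str.startswith (PySem.Str.lower s) (keyLower ++ " ")
         || PySem.Str.startswith (PySem.Str.lower s) (keyLower ++ "=") then some i
    else pvFindKeyAux keyLower (i + 1) ls

def pvFindKey (lines : List String) (key : String) : Option Int :=
  pvFindKeyAux (PySem.Str.lower key) 0 lines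

-- the '# extend-ignore' paragraph of A
def pvBlockIgnore (st : List String × Bool) : List String × Bool :=
  match pvFindKey st.1 "extend-ignore" with
  | none =>
    (st.1 ++ ["extend-ignore = " ++ PySem.Str.join ", "
        (PySem.List.sorted (pvDesiredIgnores : List String) (fun x => x.toList) false)], true)
  | some idx =>
    let current := PySem.Str.strip (pvValPart (PySem.List.pyGetD st.1 idx ""))
    let items := PySem.Set.ofList
        ((((PySem.Str.split? current ",").getD []).map PySem.Str.strip).filter (fun p => !(p == "")))
    let newItems := PySem.List.sorted (PySem.Set.union items pvDesiredIgnores) (fun x => x.toList) false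
    let newLine := "extend-ignore = " ++ PySem.Str.join ", " newItems
    if !(PySem.List.pyGetD st.1 idx "" == newLine) then (PySem.List.pySetD st.1 idx newLine, true)
    else st

-- the '# max-line-length' paragraph of A
def pvBlockMax (st : List String × Bool) : List String × Bool :=
  match pvFindKey st.1 "max-line-length" with
  | none => (st.1 ++ ["max-line-length = 88"], true)
  | some idx =>
    if !(PySem.Str.strip (pvValPart (PySem.List.pyGetD st.1 idx "")) == "88") then
      (PySem.List.pySetD st.1 idx "max-line-length = 88", true)
    else st

-- the '# exclude' paragraph of A
def pvBlockExclude (st : List String × Bool) : List String × Bool :=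
  match pvFindKey st.1 "exclude" with
  | none => (st.1 ++ ["exclude = " ++ PySem.Str.join ", " pvDesiredExclude], true)
  | some idx =>
    let current := (((PySem.Str.split? (pvValPart (PySem.List.pyGetD st.1 idx "")) ",").getD []).map
        PySem.Str.strip).filter (fun p => !(p == ""))
    let merged := (current ++ pvDesiredExclude).foldl
        (fun m item => if m.contains item then m else m ++ [item]) ([] : List String)
    let newLine := "exclude = " ++ PySem.Str.join ", " merged
    if !(PySem.List.pyGetD st.1 idx "" == newLine) then (PySem.List.pySetD st.1 idx newLine, true)
    else st

def ensure_lines (text : String) : String × Bool :=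
  let lines0 := PySem.Str.splitlines text
  let lines1 := if lines0.isEmpty then ["[flake8]"] else lines0
  let changed1 := if lines0.isEmpty then true else false
  let hasHdr := lines1.any fun l => PySem.Str.startswith (PySem.Str.lower (PySem.Str.strip l)) "[flake8]"
  let lines2 := if !hasHdr then "[flake8]" :: lines1 else lines1
  let changed2 := if !hasHdr then true else changed1
  let st := pvBlockExclude (pvBlockMax (pvBlockIgnore (lines2, changed2)))
  (PySem.Str.join "\n" st.1 ++ "\n", st.2)

-- ===== PORT B =====
def pvKeys : List String := ["extend-ignore", "max-line-length", "exclude"]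

def pvFixIgnore (line : Option String) : String :=
  match line with
  | none =>
    "extend-ignore = " ++ PySem.Str.join ", "
      (PySem.List.sorted (pvDesiredIgnores : List String) (fun x => x.toList) false)
  | some l =>
    let current := PySem.Str.strip (pvValPart l)
    let items := PySem.Set.ofList
        ((((PySem.Str.split? current ",").getD []).map PySem.Str.strip).filter (fun p => !(p == "")))
    let newItems := PySem.List.sorted (PySem.Set.union items pvDesiredIgnores) (fun x => x.toList) false
    "extend-ignore = " ++ PySem.Str.join ", " newItems

def pvFixLength (line : Option String) : String :=
  match line with
  | none => "max-line-length = 88"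
  | some l => if !(PySem.Str.strip (pvValPart l) == "88") then "max-line-length = 88" else l

def pvFixExclude (line : Option String) : String :=
  let current := match line with
    | none => ([] : List String)
    | some l => (((PySem.Str.split? (pvValPart l) ",").getD []).map PySem.Str.strip).filter (fun p => !(p == ""))
  let merged := (current ++ pvDesiredExclude).foldl
      (fun m item => if m.contains item then m else m ++ [item]) ([] : List String)
  "exclude = " ++ PySem.Str.join ", " merged

-- one pass over the enumerated lines: record each key's first matching line index
def pvScanLine (d : PySem.Dict String Int) (p : Int × String) : PySem.Dict String Int :=
  let s0 := PySem.Str.strip p.2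
  if s0 == "" || PySem.Str.startswith s0 "#" then d
  else
    let s := PySem.Str.lower s0
    pvKeys.foldl (fun d key =>
      if !(d.contains key) && (PySem.Str.startswith s (key ++ " ") || PySem.Str.startswith s (key ++ "="))
      then d.insert key p.1 else d) d

def pvBuildIdx (lines : List String) : PySem.Dict String Int :=
  (PySem.List.enumerate lines 0).foldl pvScanLine PySem.Dict.empty

-- table-driven edit step: present -> normalize in place, absent -> append
def pvApplyFix (idx : PySem.Dict String Int) (st : List String × Bool)
    (kf : String × (Option String → String)) : List String × Bool :=
  match idx.get? kf.1 with
  | none => (st.1 ++ [kf.2 none], true)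
  | some i =>
    let newLine := kf.2 (some (PySem.List.pyGetD st.1 i ""))
    if !(PySem.List.pyGetD st.1 i "" == newLine) then (PySem.List.pySetD st.1 i newLine, true)
    else st

def ensure_lines_alt (text : String) : String × Bool :=
  let lines0 := PySem.Str.splitlines text
  let changed0 := lines0.isEmpty
  let lines1 := if lines0.isEmpty then ["[flake8]"] else lines0
  let hasHdr := lines1.any fun l => PySem.Str.startswith (PySem.Str.lower (PySem.Str.strip l)) "[flake8]"
  let lines2 := if !hasHdr then "[flake8]" :: lines1 else lines1
  let changed2 := if !hasHdr then true else changed0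
  let idx := pvBuildIdx lines2
  let st := (pvKeys.zip [pvFixIgnore, pvFixLength, pvFixExclude]).foldl (pvApplyFix idx) (lines2, changed2)
  (PySem.Str.join "\n" st.1 ++ "\n", st.2)

-- ===== PRECONDITION & SPEC =====
-- the config-line predicate of A's find_key (used only to state Pre_)
def pvMatch (key l : String) : Bool :=
  let s := PySem.Str.strip l
  if s == "" || PySem.Str.startswith s "#" then false
  else PySem.Str.startswith (PySem.Str.lower s) (key ++ " ") ||
       PySem.Str.startswith (PySem.Str.lower s) (key ++ "=")

-- Pre_ excludes exactly the inputs where A raises IndexError: a first matching line for one of the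
-- three config keys that lacks an equals sign (matched via the space form of the key); B raises there too.
def Pre_ensure_lines (text : String) : Prop :=
  ∀ key ∈ (["extend-ignore", "max-line-length", "exclude"] : List String),
    (((PySem.Str.splitlines text).find? (pvMatch key)).all fun l => PySem.Str.isIn "=" l) = true

instance (text : String) : Decidable (Pre_ensure_lines text) := by
  unfold Pre_ensure_lines; infer_instance

def pvWitness_ensure_lines : String := "[flake8]\nmax-line-length = 79\n"

def Spec_ensure_lines (text : String) (out : String × Bool) : Prop := out = ensure_lines_alt text
instance (text : String) (out : String × Bool) : Decidable (Spec_ensure_lines text out) := by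
  unfold Spec_ensure_lines; infer_instance

-- ===== CLAIM (what is proved, stated in full; the proofs are below) =====
def Claim_equal_ensure_lines : Prop :=
  ∀ (text : String), Dom_ensure_lines text → Pre_ensure_lines text →
    Spec_ensure_lines text (ensure_lines text)

-- ===== LEMMAS AND PROOFS =====

-- first matching index, the specification both ports' searches are reduced to
def pvIdx (k : String) : List String → Option Nat
  | [] => none
  | l :: ls => if pvMatch k l then some 0 else (pvIdx k ls).map (· + 1)

theorem pvFindKeyAux_eq (k : String) (L : List String) :
    ∀ i : Int, pvFindKeyAux k i L = (pvIdx k L).map (fun n => i + (n : Int)) := by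
  induction L with
  | nil => intro i; rfl
  | cons l ls ih =>
    intro i
    simp only [pvFindKeyAux, pvIdx]
    by_cases h1 : (PySem.Str.strip l == "" || PySem.Str.startswith (PySem.Str.strip l) "#") = true
    · have hm : pvMatch k l = false := by simp only [pvMatch]; rw [if_pos h1]
      rw [if_pos h1, hm, ih]
      simp only [Bool.false_eq_true, if_false]
      cases pvIdx k ls <;> simp [Option.map_map] <;> push_cast <;> ring
    · have hm : pvMatch k l = (PySem.Str.startswith (PySem.Str.lower (PySem.Str.strip l)) (k ++ " ") ||
          PySem.Str.startswith (PySem.Str.lower (PySem.Str.strip l)) (k ++ "=")) := by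
        simp only [pvMatch]; rw [if_neg h1]
      rw [if_neg h1, hm]
      by_cases h2 : (PySem.Str.startswith (PySem.Str.lower (PySem.Str.strip l)) (k ++ " ") ||
          PySem.Str.startswith (PySem.Str.lower (PySem.Str.strip l)) (k ++ "=")) = true
      · rw [if_pos h2, if_pos h2]
        simp
      · rw [if_neg h2, if_neg h2, ih]
        cases pvIdx k ls <;> simp [Option.map_map] <;> push_cast <;> ring

theorem pvFindKey_eq (L : List String) (k : String) (hk : PySem.Str.lower k = k) :
    pvFindKey L k = (pvIdx k L).map (fun n : Nat => (n : Int)) := by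
  unfold pvFindKey
  rw [hk, pvFindKeyAux_eq]
  cases pvIdx k L <;> simp

-- what pvScanLine does to one key's entry
theorem pvGet?_ite_insert_of_ne (c : Prop) [Decidable c] (d : PySem.Dict String Int)
    (k k' : String) (v : Int) (h : k' ≠ k) :
    (if c then d.insert k v else d).get? k' = d.get? k' := by
  split
  · exact PySem.Dict.get?_insert_of_ne d v h
  · rfl

theorem pvOr_insert_step (d : PySem.Dict String Int) (k : String) (i : Int) (pre : Bool) :
    (if !(d.contains k) && pre then d.insert k i else d).get? k
      = (d.get? k).or (if pre then some i else none) := by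
  by_cases hc : d.contains k = true
  · cases hg : d.get? k with
    | none => rw [(PySem.Dict.get?_eq_none_iff_contains d k).mp hg] at hc; simp at hc
    | some v => simp [hc, hg]
  · simp only [Bool.not_eq_true] at hc
    rw [(PySem.Dict.get?_eq_none_iff_contains d k).mpr hc]
    by_cases hp : pre = true
    · simp [hc, hp, PySem.Dict.get?_insert_self]
    · simp only [Bool.not_eq_true] at hp
      simp [hc, hp, (PySem.Dict.get?_eq_none_iff_contains d k).mpr hc]

theorem pvScanLine_get (key : String) (hk : key ∈ pvKeys) (d : PySem.Dict String Int)
    (i : Int) (l : String) :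
    (pvScanLine d (i, l)).get? key =
      (d.get? key).or (if pvMatch key l then some i else none) := by
  simp only [pvScanLine]
  by_cases h1 : (PySem.Str.strip l == "" || PySem.Str.startswith (PySem.Str.strip l) "#") = true
  · have hm : pvMatch key l = false := by simp only [pvMatch]; rw [if_pos h1]
    rw [if_pos h1, hm]
    simp
  · have hm : pvMatch key l = (PySem.Str.startswith (PySem.Str.lower (PySem.Str.strip l)) (key ++ " ") ||
        PySem.Str.startswith (PySem.Str.lower (PySem.Str.strip l)) (key ++ "=")) := by
      simp only [pvMatch]; rw [if_neg h1]
    rw [if_neg h1, hm]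
    simp only [pvKeys] at hk ⊢
    simp only [List.foldl_cons, List.foldl_nil]
    fin_cases hk
    · rw [pvGet?_ite_insert_of_ne _ _ "exclude" "extend-ignore" _ (by decide),
        pvGet?_ite_insert_of_ne _ _ "max-line-length" "extend-ignore" _ (by decide),
        pvOr_insert_step]
    · rw [pvGet?_ite_insert_of_ne _ _ "exclude" "max-line-length" _ (by decide),
        pvOr_insert_step, pvGet?_ite_insert_of_ne _ _ "extend-ignore" "max-line-length" _ (by decide)]
    · rw [pvOr_insert_step,
        pvGet?_ite_insert_of_ne _ _ "max-line-length" "exclude" _ (by decide),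
        pvGet?_ite_insert_of_ne _ _ "extend-ignore" "exclude" _ (by decide)]

theorem pvBuild_aux (key : String) (hk : key ∈ pvKeys) (ls : List String) :
    ∀ (s : Int) (d : PySem.Dict String Int),
      ((PySem.List.enumerate ls s).foldl pvScanLine d).get? key =
        (d.get? key).or ((pvIdx key ls).map (fun n => s + (n : Int))) := by
  induction ls with
  | nil => intro s d; simp [PySem.List.enumerate_nil, pvIdx]
  | cons l ls ih =>
    intro s d
    rw [PySem.List.enumerate_cons, List.foldl_cons, ih, pvScanLine_get key hk, Option.or_assoc]
    by_cases h : pvMatch key l = true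
    · rw [show pvIdx key (l :: ls) = some 0 by simp only [pvIdx]; rw [if_pos h]]
      simp [h]
    · rw [show pvIdx key (l :: ls) = (pvIdx key ls).map (· + 1) by simp only [pvIdx]; rw [if_neg h]]
      simp only [Bool.not_eq_true] at h
      simp only [h, Bool.false_eq_true, if_false]
      congr 1
      cases pvIdx key ls with
      | none => simp
      | some n =>
        simp
        omega

theorem pvBuildIdx_get (key : String) (hk : key ∈ pvKeys) (L : List String) :
    (pvBuildIdx L).get? key = (pvIdx key L).map (fun n : Nat => (n : Int)) := by
  unfold pvBuildIdx
  rw [pvBuild_aux key hk L 0 PySem.Dict.empty]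
  cases h : pvIdx key L <;> simp [PySem.Dict.get?, PySem.Dict.empty, Option.or]

-- pvIdx is stable under edits that neither the old nor the new line lets match
theorem pvIdx_set (k : String) (L : List String) (v : String) :
    ∀ n : Nat, pvMatch k (L.getD n "") = false → pvMatch k v = false →
      pvIdx k (L.set n v) = pvIdx k L := by
  induction L with
  | nil => intro n _ _; rfl
  | cons l ls ih =>
    intro n h1 h2
    cases n with
    | zero => simp only [List.set_cons_zero, pvIdx, List.getD_cons_zero] at *; rw [h1, h2]
    | succ m =>
      simp only [List.set_cons_succ, pvIdx, List.getD_cons_succ] at *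
      rw [ih m h1 h2]

theorem pvIdx_append (k : String) (L : List String) (a : String)
    (h : pvMatch k a = false) : pvIdx k (L ++ [a]) = pvIdx k L := by
  induction L with
  | nil => simp [pvIdx, h]
  | cons l ls ih => simp only [List.cons_append, pvIdx, ih]

theorem pvIdx_some (k : String) (L : List String) :
    ∀ n : Nat, pvIdx k L = some n → pvMatch k (L.getD n "") = true := by
  induction L with
  | nil => intro n h; simp [pvIdx] at h
  | cons l ls ih =>
    intro n h
    unfold pvIdx at h
    by_cases hm : pvMatch k l = true
    · rw [if_pos hm] at h
      cases h; simpa using hm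
    · rw [if_neg hm] at h
      cases hh : pvIdx k ls with
      | none => rw [hh] at h; simp at h
      | some m =>
        rw [hh] at h
        simp only [Option.map_some] at h
        cases h
        simpa using ih m hh

-- no string can match two different config keys / a rewritten line matches only its own key
theorem pvNoCommon {s u v : List Char} (hu : u <+: s) (hv : v <+: s)
    (h1 : ¬(u <+: v)) (h2 : ¬(v <+: u)) : False := by
  rcases List.prefix_or_prefix_of_prefix hu hv with h | h
  · exact h1 h
  · exact h2 h

theorem pvMatch_excl (k1 k2 l : String)
    (hc : ∀ u ∈ [k1 ++ " ", k1 ++ "="], ∀ v ∈ [k2 ++ " ", k2 ++ "="],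
      ¬(u.toList <+: v.toList) ∧ ¬(v.toList <+: u.toList))
    (h : pvMatch k1 l = true) : pvMatch k2 l = false := by
  simp only [pvMatch] at h ⊢
  by_cases h1 : (PySem.Str.strip l == "" || PySem.Str.startswith (PySem.Str.strip l) "#") = true
  · rw [if_pos h1]
  · rw [if_neg h1] at h ⊢
    have hpre : ∃ u ∈ [k1 ++ " ", k1 ++ "="],
        u.toList <+: (PySem.Str.lower (PySem.Str.strip l)).toList := by
      rcases Bool.or_eq_true_iff.mp h with hp | hp
      · exact ⟨k1 ++ " ", by simp, by
          rw [PySem.Str.startswith_eq] at hp; exact (PySem.Chars.startswith_iff _ _).mp hp⟩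
      · exact ⟨k1 ++ "=", by simp, by
          rw [PySem.Str.startswith_eq] at hp; exact (PySem.Chars.startswith_iff _ _).mp hp⟩
    obtain ⟨u, hu, hup⟩ := hpre
    have g : ∀ v ∈ [k2 ++ " ", k2 ++ "="],
        PySem.Str.startswith (PySem.Str.lower (PySem.Str.strip l)) v = false := by
      intro v hv
      by_contra hne
      rw [Bool.not_eq_false, PySem.Str.startswith_eq] at hne
      have hvp := (PySem.Chars.startswith_iff _ _).mp hne
      exact pvNoCommon hup hvp (hc u hu v hv).1 (hc u hu v hv).2
    rw [g (k2 ++ " ") (by simp), g (k2 ++ "=") (by simp)]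
    rfl

theorem pvStripPrefix (t : String) :
    "extend-ignore".toList <+: (PySem.Str.strip ("extend-ignore = " ++ t)).toList := by
  rw [PySem.Str.toList_strip]
  have hl : ("extend-ignore = " ++ t).toList
      = 'e' :: ("xtend-ignore =".toList ++ (' ' :: t.toList)) := by
    rw [String.toList_append]
    rfl
  rw [hl]
  unfold PySem.Chars.strip PySem.Chars.lstrip PySem.Chars.rstrip
  rw [List.dropWhile_cons_of_neg (by decide)]
  have h2 : ('e' :: ("xtend-ignore =".toList ++ (' ' :: t.toList)))
      = "extend-ignore =".toList ++ (' ' :: t.toList) := rfl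
  rw [h2, List.reverse_append, List.dropWhile_append]
  split
  · -- the tail reversed is all whitespace: what remains is the reversed head, itself ending '='
    rw [show List.dropWhile PySem.Chars.isspace ("extend-ignore =".toList.reverse)
        = "extend-ignore =".toList.reverse from by decide]
    rw [List.reverse_reverse]
    decide
  · rw [List.reverse_append, List.reverse_reverse]
    exact ((by decide : "extend-ignore".toList <+: "extend-ignore =".toList).trans
      (List.prefix_append _ _))

theorem pvMatch_ign_line (t k2 : String)
    (hc : ∀ v ∈ [k2 ++ " ", k2 ++ "="],
      ¬("extend-ignore".toList <+: v.toList) ∧ ¬(v.toList <+: "extend-ignore".toList)) :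
    pvMatch k2 ("extend-ignore = " ++ t) = false := by
  have hcore : "extend-ignore".toList <+:
      (PySem.Str.lower (PySem.Str.strip ("extend-ignore = " ++ t))).toList := by
    rw [PySem.Str.toList_lower]
    have := (pvStripPrefix t).map PySem.Chars.lowerChar
    rw [show "extend-ignore".toList.map PySem.Chars.lowerChar = "extend-ignore".toList from by decide] at this
    exact this
  simp only [pvMatch]
  by_cases h1 : (PySem.Str.strip ("extend-ignore = " ++ t) == ""
      || PySem.Str.startswith (PySem.Str.strip ("extend-ignore = " ++ t)) "#") = true
  · rw [if_pos h1]
  · rw [if_neg h1]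
    have g : ∀ v ∈ [k2 ++ " ", k2 ++ "="],
        PySem.Str.startswith (PySem.Str.lower (PySem.Str.strip ("extend-ignore = " ++ t))) v = false := by
      intro v hv
      by_contra hne
      rw [Bool.not_eq_false, PySem.Str.startswith_eq] at hne
      have hvp := (PySem.Chars.startswith_iff _ _).mp hne
      exact pvNoCommon hcore hvp (hc v hv).1 (hc v hv).2
    rw [g (k2 ++ " ") (by simp), g (k2 ++ "=") (by simp)]
    rfl

-- the three edit paragraphs agree with B's table-driven step, given the index the dict holds
theorem pvBlockIgnore_eq (st : List String × Bool) (d : PySem.Dict String Int)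
    (hd : d.get? "extend-ignore" = (pvIdx "extend-ignore" st.1).map (fun n : Nat => (n : Int))) :
    pvBlockIgnore st = pvApplyFix d st ("extend-ignore", pvFixIgnore) := by
  unfold pvBlockIgnore pvApplyFix
  rw [hd, pvFindKey_eq st.1 "extend-ignore" (by decide)]
  cases pvIdx "extend-ignore" st.1 with
  | none => rfl
  | some n => rfl

set_option maxHeartbeats 1000000 in
theorem pvBlockMax_eq (st : List String × Bool) (d : PySem.Dict String Int)
    (hd : d.get? "max-line-length" = (pvIdx "max-line-length" st.1).map (fun n : Nat => (n : Int))) :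
    pvBlockMax st = pvApplyFix d st ("max-line-length", pvFixLength) := by
  unfold pvBlockMax pvApplyFix
  rw [hd, pvFindKey_eq st.1 "max-line-length" (by decide)]
  cases pvIdx "max-line-length" st.1 with
  | none => rfl
  | some n =>
    rw [show (Option.map (fun n : Nat => (n : Int)) (some n)) = some ((n : Int)) from rfl]
    dsimp only
    by_cases h88 : (PySem.Str.strip (pvValPart (PySem.List.pyGetD st.1 (n : Int) "")) == "88") = true
    · have hfl : pvFixLength (some (PySem.List.pyGetD st.1 (n : Int) ""))
          = PySem.List.pyGetD st.1 (n : Int) "" := by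
        simp only [pvFixLength, h88, Bool.not_true, Bool.false_eq_true, if_false]
      rw [hfl, h88]
      simp
    · rw [Bool.not_eq_true] at h88
      have hfl : pvFixLength (some (PySem.List.pyGetD st.1 (n : Int) ""))
          = "max-line-length = 88" := by
        simp only [pvFixLength, h88, Bool.not_false, if_true]
      have hne : (PySem.List.pyGetD st.1 (n : Int) "" == "max-line-length = 88") = false := by
        by_contra hx
        rw [Bool.not_eq_false, beq_iff_eq] at hx
        rw [hx] at h88
        exact absurd h88 (by decide)
      rw [hfl, h88, hne]

theorem pvBlockExclude_eq (st : List String × Bool) (d : PySem.Dict String Int)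
    (hd : d.get? "exclude" = (pvIdx "exclude" st.1).map (fun n : Nat => (n : Int))) :
    pvBlockExclude st = pvApplyFix d st ("exclude", pvFixExclude) := by
  unfold pvBlockExclude pvApplyFix
  rw [hd, pvFindKey_eq st.1 "exclude" (by decide)]
  cases pvIdx "exclude" st.1 with
  | none => rfl
  | some n => rfl

-- an edit step for key k1 does not move any other key's first match
theorem pvApplyFix_stab (d : PySem.Dict String Int) (st : List String × Bool)
    (k1 : String) (fx : Option String → String) (k2 : String)
    (hd : d.get? k1 = (pvIdx k1 st.1).map (fun n : Nat => (n : Int)))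
    (hexcl : ∀ l, pvMatch k1 l = true → pvMatch k2 l = false)
    (hnone : pvMatch k2 (fx none) = false)
    (hsome : ∀ l, fx (some l) = l ∨ pvMatch k2 (fx (some l)) = false) :
    pvIdx k2 (pvApplyFix d st (k1, fx)).1 = pvIdx k2 st.1 := by
  unfold pvApplyFix
  rw [hd]
  cases h : pvIdx k1 st.1 with
  | none => exact pvIdx_append k2 st.1 _ hnone
  | some n =>
    simp only [Option.map_some]
    by_cases hc : (!(PySem.List.pyGetD st.1 (n : Int) ""
        == fx (some (PySem.List.pyGetD st.1 (n : Int) "")))) = true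
    · rw [if_pos hc]
      simp only [PySem.List.pySetD_natCast, PySem.List.pyGetD_natCast]
      rcases hsome (PySem.List.pyGetD st.1 (n : Int) "") with heq | hm
      · rw [heq] at hc; simp at hc
      · refine pvIdx_set k2 st.1 _ n (hexcl _ ?_) ?_
        · exact pvIdx_some k1 st.1 n h
        · simpa using hm
    · rw [if_neg hc]

theorem pvChain (L : List String) (c : Bool) :
    pvBlockExclude (pvBlockMax (pvBlockIgnore (L, c))) =
      pvApplyFix (pvBuildIdx L)
        (pvApplyFix (pvBuildIdx L)
          (pvApplyFix (pvBuildIdx L) (L, c) ("extend-ignore", pvFixIgnore))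
          ("max-line-length", pvFixLength))
        ("exclude", pvFixExclude) := by
  have hIgnMax : ∀ l, pvMatch "extend-ignore" l = true → pvMatch "max-line-length" l = false :=
    fun l => pvMatch_excl _ _ l (by decide)
  have hIgnExc : ∀ l, pvMatch "extend-ignore" l = true → pvMatch "exclude" l = false :=
    fun l => pvMatch_excl _ _ l (by decide)
  have hMaxExc : ∀ l, pvMatch "max-line-length" l = true → pvMatch "exclude" l = false :=
    fun l => pvMatch_excl _ _ l (by decide)
  have hFixIgnMax : ∀ o, pvMatch "max-line-length" (pvFixIgnore o) = false := by
    intro o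
    cases o <;> exact pvMatch_ign_line _ "max-line-length" (by decide)
  have hFixIgnExc : ∀ o, pvMatch "exclude" (pvFixIgnore o) = false := by
    intro o
    cases o <;> exact pvMatch_ign_line _ "exclude" (by decide)
  have hFixLenExc : ∀ l, pvFixLength (some l) = l ∨ pvMatch "exclude" (pvFixLength (some l)) = false := by
    intro l
    by_cases hx : (!(PySem.Str.strip (pvValPart l) == "88")) = true
    · right
      show pvMatch "exclude" (if (!(PySem.Str.strip (pvValPart l) == "88")) = true
        then "max-line-length = 88" else l) = false
      rw [if_pos hx]
      decide
    · left
      show (if (!(PySem.Str.strip (pvValPart l) == "88")) = true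
        then "max-line-length = 88" else l) = l
      rw [if_neg hx]
  rw [pvBlockIgnore_eq (L, c) (pvBuildIdx L) (pvBuildIdx_get "extend-ignore" (by decide) L)]
  have hb1 : pvIdx "max-line-length" (pvApplyFix (pvBuildIdx L) (L, c) ("extend-ignore", pvFixIgnore)).1
      = pvIdx "max-line-length" L :=
    pvApplyFix_stab _ _ _ _ _ (pvBuildIdx_get "extend-ignore" (by decide) L) hIgnMax
      (hFixIgnMax none) (fun l => Or.inr (hFixIgnMax (some l)))
  have hb2 : pvIdx "exclude" (pvApplyFix (pvBuildIdx L) (L, c) ("extend-ignore", pvFixIgnore)).1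
      = pvIdx "exclude" L :=
    pvApplyFix_stab _ _ _ _ _ (pvBuildIdx_get "extend-ignore" (by decide) L) hIgnExc
      (hFixIgnExc none) (fun l => Or.inr (hFixIgnExc (some l)))
  rw [pvBlockMax_eq _ (pvBuildIdx L) (by rw [pvBuildIdx_get "max-line-length" (by decide) L, hb1])]
  have hb3 : pvIdx "exclude" (pvApplyFix (pvBuildIdx L)
        (pvApplyFix (pvBuildIdx L) (L, c) ("extend-ignore", pvFixIgnore))
        ("max-line-length", pvFixLength)).1
      = pvIdx "exclude" (pvApplyFix (pvBuildIdx L) (L, c) ("extend-ignore", pvFixIgnore)).1 :=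
    pvApplyFix_stab _ _ _ _ _ (by rw [pvBuildIdx_get "max-line-length" (by decide) L, hb1]) hMaxExc
      (by decide) hFixLenExc
  rw [pvBlockExclude_eq _ (pvBuildIdx L) (by rw [pvBuildIdx_get "exclude" (by decide) L, ← hb2, ← hb3])]

theorem pv_main (text : String) : ensure_lines text = ensure_lines_alt text := by
  simp only [ensure_lines, ensure_lines_alt]
  have hch : (if (PySem.Str.splitlines text).isEmpty then true else false)
      = (PySem.Str.splitlines text).isEmpty := by
    by_cases h : (PySem.Str.splitlines text).isEmpty <;> simp [h]
  rw [hch]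
  generalize (PySem.Str.splitlines text).isEmpty = b
  generalize PySem.Str.splitlines text = L0
  generalize hL1 : (if b then ["[flake8]"] else L0) = L1
  generalize (L1.any fun l =>
      PySem.Str.startswith (PySem.Str.lower (PySem.Str.strip l)) "[flake8]") = hd
  generalize (if !hd then "[flake8]" :: L1 else L1) = L2
  generalize (if !hd then true else b) = c2
  rw [show pvKeys.zip [pvFixIgnore, pvFixLength, pvFixExclude]
      = [("extend-ignore", pvFixIgnore), ("max-line-length", pvFixLength),
         ("exclude", pvFixExclude)] from rfl]
  simp only [List.foldl_cons, List.foldl_nil]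
  rw [pvChain L2 c2]

-- ===== VERDICT (by name: the statement is the Claim_ definition above) =====
theorem ensure_lines_spec : Claim_equal_ensure_lines := by
  intro text _ _
  unfold Spec_ensure_lines
  exact pv_main text
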